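-- pv_equiv track=rewrite | github.com/Ramsi-K/LeetCode-solutions | 2598-smallest-missing-non-negative-integer-after-operations/2598-smallest-missing-non-negative-integer-after-operations.py | findSmallestInteger
-- ===== SOURCE A (Python) =====
-- from typing import List
--
-- def findSmallestInteger(nums: List[int], value: int) -> int:
--     # I still don't understand this question
--     # the best i got is group numbers by remainder and count how far you can go
--     freq = [0] * value
--     for a in nums:
--         r = a % value
--         if r < 0:
--             r += value
--         freq[r] += 1
--
--     x = 0
--     while True:
--         r = x % value
--         if freq[r] == 0:
--             return x
--         freq[r] -= 1
--         x += 1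
-- ===== SOURCE B (Python) =====
-- from typing import List
--
-- def findSmallestInteger(nums: List[int], value: int) -> int:
--     # Closed form: count remainders once; the answer is m*value + r0 where m is
--     # the smallest bucket count and r0 the smallest remainder attaining it.
--     freq = [0] * value
--     for a in nums:
--         freq[a % value] += 1
--     m = min(freq)
--     return m * value + freq.index(m)
-- ===== Notes on version B (the rewrite author's own statement) =====
-- stated objective: alternative
-- what changed: A drains remainder buckets one x at a time until a bucket is empty; B computes the answer in closed form as min(freq)*value + freq.index(min(freq)) after the same counting pass.
import Mathlib
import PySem

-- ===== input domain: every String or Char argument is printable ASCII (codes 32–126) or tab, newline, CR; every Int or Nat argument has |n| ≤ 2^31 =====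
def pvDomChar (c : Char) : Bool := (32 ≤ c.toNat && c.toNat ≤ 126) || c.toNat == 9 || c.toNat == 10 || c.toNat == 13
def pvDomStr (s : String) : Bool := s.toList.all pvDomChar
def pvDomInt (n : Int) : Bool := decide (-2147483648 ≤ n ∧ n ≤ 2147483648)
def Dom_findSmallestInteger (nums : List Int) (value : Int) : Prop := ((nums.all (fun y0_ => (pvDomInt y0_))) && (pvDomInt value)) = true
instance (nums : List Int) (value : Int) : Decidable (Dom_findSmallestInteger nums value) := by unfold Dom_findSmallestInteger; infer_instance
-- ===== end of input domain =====

-- B replaces A's bucket-draining while-loop by a closed form over the same frequency table.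

-- ===== PORT A =====
-- The while-loop, as fuel-bounded recursion; the fuel chosen in findSmallestInteger is
-- proved sufficient under Pre_ (the Python loop always terminates for value ≥ 1).
def findSmallestIntegerLoop (value : Int) : List Int → Int → Nat → Int
  | _, x, 0 => x
  | freq, x, fuel+1 =>
    let r := PySem.Int.mod x value
    if PySem.List.pyGetD freq r 0 = 0 then x
    else findSmallestIntegerLoop value
      (PySem.List.pySetD freq r (PySem.List.pyGetD freq r 0 - 1)) (x + 1) fuel

def findSmallestInteger (nums : List Int) (value : Int) : Int :=
  let freq := nums.foldl (fun freq a =>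
    let r := PySem.Int.mod a value
    let r2 := if r < 0 then r + value else r
    PySem.List.pySetD freq r2 (PySem.List.pyGetD freq r2 0 + 1))
    (PySem.List.pyRepeat [0] value)
  findSmallestIntegerLoop value freq 0 (((freq.foldl (· + ·) 0).toNat + 1) * value.toNat)

-- ===== PORT B =====
def findSmallestInteger_alt (nums : List Int) (value : Int) : Int :=
  let freq := nums.foldl (fun freq a =>
    let r := PySem.Int.mod a value
    PySem.List.pySetD freq r (PySem.List.pyGetD freq r 0 + 1))
    (PySem.List.pyRepeat [0] value)
  let m := (PySem.List.min? freq (fun x => x)).getD 0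
  m * value + (((PySem.List.index? freq m).getD 0 : Nat) : Int)

-- ===== PRECONDITION & SPEC =====
-- Pre_ excludes exactly value ≤ 0, where the Python A raises
-- (ZeroDivisionError for value == 0, IndexError on the empty freq list for value < 0).
def Pre_findSmallestInteger (nums : List Int) (value : Int) : Prop := 1 ≤ value
instance (nums : List Int) (value : Int) : Decidable (Pre_findSmallestInteger nums value) := by unfold Pre_findSmallestInteger; infer_instance

def pvWitness_findSmallestInteger : List Int × Int := ([0, 1, 2], 3)

def Spec_findSmallestInteger (nums : List Int) (value : Int) (out : Int) : Prop := out = findSmallestInteger_alt nums value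
instance (nums : List Int) (value : Int) (out : Int) : Decidable (Spec_findSmallestInteger nums value out) := by unfold Spec_findSmallestInteger; infer_instance

-- ===== CLAIM (what is proved, stated in full; the proofs are below) =====
def Claim_equal_findSmallestInteger : Prop := ∀ (nums : List Int) (value : Int), Dom_findSmallestInteger nums value → Pre_findSmallestInteger nums value → Spec_findSmallestInteger nums value (findSmallestInteger nums value)

-- ===== LEMMAS AND PROOFS =====

-- The value A's loop returns from state (freq, x): minimum over the v buckets of
-- (steps until bucket (x+i) % v empties).
def pvGmin (freq : List Int) (x : Nat) : Int :=
  if h : 0 < freq.length then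
    (Finset.range freq.length).inf' (by simpa using Nat.pos_iff_ne_zero.mp h)
      (fun i => freq.getD ((x + i) % freq.length) 0 * (freq.length : Int) + (i : Int))
  else 0

theorem pvGetD_nonneg (freq : List Int) (n : Nat) (hpos : ∀ e ∈ freq, 0 ≤ e) :
    0 ≤ freq.getD n 0 := by
  by_cases h : n < freq.length
  · rw [List.getD_eq_getElem _ _ h]; exact hpos _ (List.getElem_mem h)
  · rw [List.getD_eq_default _ _ (by omega)]

theorem pvGmin_nonneg (freq : List Int) (x : Nat) (h : 0 < freq.length)
    (hpos : ∀ e ∈ freq, 0 ≤ e) : 0 ≤ pvGmin freq x := by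
  rw [pvGmin, dif_pos h]
  apply Finset.le_inf'
  intro i _
  have h1 : 0 ≤ freq.getD ((x + i) % freq.length) 0 := pvGetD_nonneg _ _ hpos
  have h2 : (0 : Int) ≤ (freq.length : Int) := by positivity
  have h3 : (0 : Int) ≤ (i : Int) := by positivity
  nlinarith

theorem pvGmin_zero (freq : List Int) (x : Nat) (h : 0 < freq.length)
    (hpos : ∀ e ∈ freq, 0 ≤ e) (hz : freq.getD (x % freq.length) 0 = 0) :
    pvGmin freq x = 0 := by
  rw [pvGmin, dif_pos h]
  apply le_antisymm
  · calc (Finset.range freq.length).inf' _ _ ≤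
        freq.getD ((x + 0) % freq.length) 0 * (freq.length : Int) + ((0 : Nat) : Int) :=
          Finset.inf'_le _ (Finset.mem_range.mpr h)
      _ = 0 := by simp only [Nat.cast_zero, add_zero, hz, zero_mul]
  · apply Finset.le_inf'
    intro i _
    have h1 : 0 ≤ freq.getD ((x + i) % freq.length) 0 := pvGetD_nonneg _ _ hpos
    have h2 : (0 : Int) ≤ (freq.length : Int) := by positivity
    have h3 : (0 : Int) ≤ (i : Int) := by positivity
    nlinarith

theorem pvGmin_step (freq : List Int) (x : Nat) (h : 0 < freq.length) :
    pvGmin freq x =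
      pvGmin (freq.set (x % freq.length) (freq.getD (x % freq.length) 0 - 1)) (x + 1) + 1 := by
  set v := freq.length with hvdef
  set r := x % v with hrdef
  set c := freq.getD r 0 with hcdef
  set freq' := freq.set r (c - 1) with hfdef
  have hrlt : r < v := Nat.mod_lt _ h
  have hlen' : freq'.length = v := by rw [hfdef, List.length_set]
  have hgetr : freq'.getD r 0 = c - 1 := by
    rw [hfdef, List.getD_eq_getElem _ _ (by rw [List.length_set]; exact hrlt)]
    simp
  have hgetne : ∀ n, n < v → n ≠ r → freq'.getD n 0 = freq.getD n 0 := by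
    intro n hn hne
    rw [hfdef, List.getD_eq_getElem _ _ (by rw [List.length_set]; exact hn),
      List.getD_eq_getElem _ _ hn]
    exact List.getElem_set_ne (by omega) _
  -- the i-th term of pvGmin freq x equals 1 + the (φ i)-th term of pvGmin freq' (x+1)
  have key : ∀ i, i < v →
      freq.getD ((x + i) % v) 0 * (v : Int) + (i : Int)
      = freq'.getD ((x + 1 + (if i = 0 then v - 1 else i - 1)) % v) 0 * (v : Int)
        + (((if i = 0 then v - 1 else i - 1) : Nat) : Int) + 1 := by
    intro i hi
    by_cases hi0 : i = 0
    · subst hi0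
      rw [if_pos rfl]
      have h2 : (x + 1 + (v - 1)) % v = r := by
        have he : x + 1 + (v - 1) = x + v := by omega
        rw [he, Nat.add_mod_right]
      have h1 : (x + 0) % v = r := by rw [Nat.add_zero]
      rw [h1, h2, hgetr]
      have hv1 : (((v - 1) : Nat) : Int) = (v : Int) - 1 := by
        have : (1 : Nat) ≤ v := h
        push_cast [Nat.cast_sub this]
        ring
      rw [hv1]
      push_cast
      ring
    · have hne : (x + i) % v ≠ r := by
        intro hEq
        have hmod : (x + i) % v = x % v := by rw [hEq, hrdef]
        have : (x + i) ≡ x [MOD v] := hmod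
        have hdvd : (v : Int) ∣ (x : Int) - ((x + i : Nat) : Int) := this.dvd
        have heq : (x : Int) - ((x + i : Nat) : Int) = -(i : Int) := by push_cast; ring
        rw [heq, Int.dvd_neg] at hdvd
        have := hdvd
        have := Int.le_of_dvd (by exact_mod_cast Nat.pos_of_ne_zero hi0) this
        omega
      simp only [if_neg hi0]
      have h3 : (x + 1 + (i - 1)) % v = (x + i) % v := by
        congr 1; omega
      rw [h3, hgetne _ (Nat.mod_lt _ h) hne]
      have : ((i - 1 : Nat) : Int) = (i : Int) - 1 := by
        have h1 : (1 : Nat) ≤ i := Nat.one_le_iff_ne_zero.mpr hi0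
        push_cast [Nat.cast_sub h1]; ring
      rw [this]; ring
  have hpos' : (Finset.range v).Nonempty := ⟨0, Finset.mem_range.mpr h⟩
  rw [pvGmin, pvGmin, dif_pos (show 0 < freq.length from h), dif_pos (show 0 < freq'.length by rw [hlen']; exact h)]
  simp only [hlen']
  apply le_antisymm
  · obtain ⟨j, hj, hEq⟩ := Finset.exists_mem_eq_inf' (s := Finset.range v) hpos'
      (fun j => freq'.getD ((x + 1 + j) % v) 0 * (v : Int) + (j : Int))
    have hjv : j < v := Finset.mem_range.mp hj
    have hiv : (if j = v - 1 then 0 else j + 1) < v := by split <;> omega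
    have hφ : (if (if j = v - 1 then 0 else j + 1) = 0 then v - 1
        else (if j = v - 1 then 0 else j + 1) - 1) = j := by
      by_cases hj1 : j = v - 1 <;> simp [hj1]
    have hkey := key _ hiv
    rw [hφ] at hkey
    calc (Finset.range v).inf' hpos'
          (fun i => freq.getD ((x + i) % v) 0 * (v : Int) + (i : Int))
        ≤ freq.getD ((x + (if j = v - 1 then 0 else j + 1)) % v) 0 * (v : Int)
            + ((if j = v - 1 then 0 else j + 1 : Nat) : Int) :=
          Finset.inf'_le _ (Finset.mem_range.mpr hiv)
      _ = freq'.getD ((x + 1 + j) % v) 0 * (v : Int) + (j : Int) + 1 := hkey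
      _ = (Finset.range v).inf' hpos'
            (fun j => freq'.getD ((x + 1 + j) % v) 0 * (v : Int) + (j : Int)) + 1 := by
          rw [hEq]
  · obtain ⟨i, hi, hEq⟩ := Finset.exists_mem_eq_inf' (s := Finset.range v) hpos'
      (fun i => freq.getD ((x + i) % v) 0 * (v : Int) + (i : Int))
    have hiv : i < v := Finset.mem_range.mp hi
    have hφlt : (if i = 0 then v - 1 else i - 1) < v := by split <;> omega
    have hkey := key _ hiv
    have hle : (Finset.range v).inf' hpos'
          (fun j => freq'.getD ((x + 1 + j) % v) 0 * (v : Int) + (j : Int))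
        ≤ freq'.getD ((x + 1 + (if i = 0 then v - 1 else i - 1)) % v) 0 * (v : Int)
            + (((if i = 0 then v - 1 else i - 1) : Nat) : Int) :=
      Finset.inf'_le _ (Finset.mem_range.mpr hφlt)
    rw [hEq]
    omega

theorem pvLoop_eq (value : Int) (hv : 1 ≤ value) :
    ∀ (fuel : Nat) (freq : List Int) (n : Nat),
      freq.length = value.toNat → (∀ e ∈ freq, 0 ≤ e) →
      pvGmin freq n < (fuel : Int) →
      findSmallestIntegerLoop value freq (n : Int) fuel = (n : Int) + pvGmin freq n := by
  intro fuel
  induction fuel with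
  | zero =>
    intro freq n hlen hpos hlt
    have hv0 : 0 < freq.length := by rw [hlen]; omega
    have := pvGmin_nonneg freq n hv0 hpos
    push_cast at hlt
    linarith
  | succ fuel ih =>
    intro freq n hlen hpos hlt
    have hv0 : 0 < freq.length := by rw [hlen]; omega
    have hval : value = ((value.toNat : Nat) : Int) := (Int.toNat_of_nonneg (by omega)).symm
    have hmod : PySem.Int.mod (n : Int) value = ((n % value.toNat : Nat) : Int) := by
      rw [hval]; exact PySem.Int.mod_natCast n value.toNat
    have hidx : n % value.toNat = n % freq.length := by rw [hlen]
    rw [findSmallestIntegerLoop]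
    simp only [hmod, PySem.List.pyGetD_natCast, PySem.List.pySetD_natCast]
    by_cases hz : freq.getD (n % value.toNat) 0 = 0
    · rw [if_pos hz, pvGmin_zero freq n hv0 hpos (by rw [← hidx]; exact hz)]
      ring
    · rw [if_neg hz]
      have hstep := pvGmin_step freq n hv0
      set freq'' := freq.set (n % freq.length) (freq.getD (n % freq.length) 0 - 1) with hf''
      have hlen'' : freq''.length = value.toNat := by rw [hf'', List.length_set, hlen]
      have hpos'' : ∀ e ∈ freq'', 0 ≤ e := by
        intro e he
        rcases List.mem_or_eq_of_mem_set he with h1 | h1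
        · exact hpos _ h1
        · rw [h1]
          have h2 : 0 ≤ freq.getD (n % freq.length) 0 := pvGetD_nonneg _ _ hpos
          have hne : freq.getD (n % freq.length) 0 ≠ 0 := by rw [← hidx]; exact hz
          omega
      have hlt'' : pvGmin freq'' (n + 1) < (fuel : Int) := by
        push_cast at hlt
        linarith
      have hrw : ((n : Int) + 1) = (((n + 1 : Nat) : Nat) : Int) := by push_cast; ring
      rw [hidx, ← hf'', hrw, ih freq'' (n + 1) hlen'' hpos'' hlt'']
      push_cast
      linarith

theorem pvGmin_closed (freq : List Int) (m : Int) (k : Nat) (h : 0 < freq.length)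
    (hm : PySem.List.min? freq (fun x => x) = some m)
    (hk : PySem.List.index? freq m = some k) :
    pvGmin freq 0 = m * (freq.length : Int) + (k : Int) := by
  obtain ⟨hk, hgk, hfirst⟩ := PySem.List.getElem_of_index?_eq_some hk
  have hmin : ∀ y ∈ freq, m ≤ y := by
    intro y hy
    exact PySem.List.min?_isMin hm y hy
  rw [pvGmin, dif_pos h]
  apply le_antisymm
  · calc (Finset.range freq.length).inf' _ _
        ≤ freq.getD ((0 + k) % freq.length) 0 * (freq.length : Int) + (k : Int) :=
          Finset.inf'_le _ (Finset.mem_range.mpr hk)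
      _ = m * (freq.length : Int) + (k : Int) := by
          rw [Nat.zero_add, Nat.mod_eq_of_lt hk, List.getD_eq_getElem _ _ hk, hgk]
  · apply Finset.le_inf'
    intro i hi
    have hiv : i < freq.length := Finset.mem_range.mp hi
    rw [Nat.zero_add, Nat.mod_eq_of_lt hiv, List.getD_eq_getElem _ _ hiv]
    have hge : m ≤ freq[i] := hmin _ (List.getElem_mem hiv)
    rcases eq_or_lt_of_le hge with heq | hlt
    · have hik : k ≤ i := by
        by_contra hcon
        exact hfirst i (by omega) heq.symm
      have : ((k : Nat) : Int) ≤ (i : Int) := by exact_mod_cast hik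
      nlinarith
    · have h1 : m + 1 ≤ freq[i] := hlt
      have h2 : ((k : Nat) : Int) < (freq.length : Int) := by exact_mod_cast hk
      have h3 : (0 : Int) ≤ (i : Int) := by positivity
      nlinarith

-- A's counting pass (with its dead `if r < 0` branch: r = a % value ≥ 0 for value ≥ 1)
-- builds the same table as B's.
theorem pvBuild_eq (value : Int) (hv : 1 ≤ value) (nums : List Int) (init : List Int) :
    nums.foldl (fun freq a =>
      let r := PySem.Int.mod a value
      let r2 := if r < 0 then r + value else r
      PySem.List.pySetD freq r2 (PySem.List.pyGetD freq r2 0 + 1)) init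
    = nums.foldl (fun freq a =>
      let r := PySem.Int.mod a value
      PySem.List.pySetD freq r (PySem.List.pyGetD freq r 0 + 1)) init := by
  have hfe : (fun (freq : List Int) (a : Int) =>
      let r := PySem.Int.mod a value
      let r2 := if r < 0 then r + value else r
      PySem.List.pySetD freq r2 (PySem.List.pyGetD freq r2 0 + 1))
      = (fun (freq : List Int) (a : Int) =>
      let r := PySem.Int.mod a value
      PySem.List.pySetD freq r (PySem.List.pyGetD freq r 0 + 1)) := by
    funext freq a
    have h0 : ¬ PySem.Int.mod a value < 0 :=
      not_lt.mpr (PySem.Int.mod_nonneg a (by omega))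
    simp [h0]
  rw [hfe]

theorem pvStep_eq (r : Int) (hr : 0 ≤ r) (acc : List Int) :
    PySem.List.pySetD acc r (PySem.List.pyGetD acc r 0 + 1)
      = acc.set r.toNat (acc.getD r.toNat 0 + 1) := by
  obtain ⟨n, rfl⟩ := Int.eq_ofNat_of_zero_le hr
  simp

theorem pvBuild_inv (value : Int) (hv : 1 ≤ value) :
    ∀ (l : List Int) (acc : List Int), acc.length = value.toNat → (∀ e ∈ acc, 0 ≤ e) →
    (l.foldl (fun freq a =>
      let r := PySem.Int.mod a value
      PySem.List.pySetD freq r (PySem.List.pyGetD freq r 0 + 1)) acc).length = value.toNat ∧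
    (∀ e ∈ l.foldl (fun freq a =>
      let r := PySem.Int.mod a value
      PySem.List.pySetD freq r (PySem.List.pyGetD freq r 0 + 1)) acc, 0 ≤ e) := by
  intro l
  induction l with
  | nil => intro acc h1 h2; exact ⟨h1, h2⟩
  | cons a t ih =>
    intro acc h1 h2
    rw [List.foldl_cons]
    have hr : 0 ≤ PySem.Int.mod a value := PySem.Int.mod_nonneg a (by omega)
    apply ih
    · simp only [pvStep_eq _ hr, List.length_set]
      exact h1
    · simp only [pvStep_eq _ hr]
      intro e he
      rcases List.mem_or_eq_of_mem_set he with hm | hm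
      · exact h2 _ hm
      · rw [hm]
        have := pvGetD_nonneg acc (PySem.Int.mod a value).toNat h2
        omega

-- the loop applied to any well-formed frequency table returns B's closed form
theorem pvMain (value : Int) (hv : 1 ≤ value) (freq : List Int)
    (hlen : freq.length = value.toNat) (hpos : ∀ e ∈ freq, 0 ≤ e) :
    findSmallestIntegerLoop value freq 0 (((freq.foldl (· + ·) 0).toNat + 1) * value.toNat)
      = (PySem.List.min? freq (fun x => x)).getD 0 * value
        + ((((PySem.List.index? freq ((PySem.List.min? freq (fun x => x)).getD 0)).getD 0 : Nat)) : Int) := by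
  have hv0 : 0 < freq.length := by rw [hlen]; omega
  have hne : freq ≠ [] := by intro hcon; rw [hcon] at hv0; simp at hv0
  obtain ⟨m, hm⟩ : ∃ m, PySem.List.min? freq (fun x => x) = some m := by
    rcases hmm : PySem.List.min? freq (fun x => x) with _ | m
    · exact absurd (Iff.mp (PySem.List.min?_eq_none_iff _ _) hmm) hne
    · exact ⟨m, rfl⟩
  have hmem : m ∈ freq := PySem.List.min?_mem hm
  obtain ⟨k, hk⟩ : ∃ k, PySem.List.index? freq m = some k := by
    rcases hkk : PySem.List.index? freq m with _ | k
    · exact absurd hmem (Iff.mp (PySem.List.index?_eq_none_iff _ _) hkk)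
    · exact ⟨k, rfl⟩
  rw [hm]
  simp only [Option.getD_some]
  rw [hk]
  simp only [Option.getD_some]
  set S := freq.foldl (· + ·) 0 with hSdef
  have hSsum : S = freq.sum := by
    rw [hSdef, List.sum_eq_foldl]
  have hS0 : 0 ≤ S := by
    rw [hSsum]
    exact List.sum_nonneg hpos
  have hhead : freq.getD 0 0 ≤ S := by
    obtain ⟨hd, tl, hcons⟩ := List.exists_cons_of_ne_nil hne
    have htl : 0 ≤ tl.sum := List.sum_nonneg
      (by intro e he; exact hpos _ (by rw [hcons]; exact List.mem_cons_of_mem _ he))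
    rw [hSsum, hcons]
    simp only [List.getD_cons_zero, List.sum_cons]
    omega
  have hvcast : (freq.length : Int) = value := by
    rw [hlen, Int.toNat_of_nonneg (by omega)]
  have hfuel : pvGmin freq 0 < (((S.toNat + 1) * value.toNat : Nat) : Int) := by
    have hle : pvGmin freq 0 ≤ freq.getD 0 0 * (freq.length : Int) := by
      rw [pvGmin, dif_pos hv0]
      calc (Finset.range freq.length).inf' _ _
          ≤ freq.getD ((0 + 0) % freq.length) 0 * (freq.length : Int) + ((0 : Nat) : Int) :=
            Finset.inf'_le _ (Finset.mem_range.mpr hv0)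
        _ = freq.getD 0 0 * (freq.length : Int) := by
            rw [Nat.zero_add, Nat.zero_mod]; simp
    have hcast : (((S.toNat + 1) * value.toNat : Nat) : Int) = (S + 1) * value := by
      push_cast [Int.toNat_of_nonneg hS0, Int.toNat_of_nonneg (show (0:Int) ≤ value by omega)]
      ring
    rw [hcast]
    have h1 : freq.getD 0 0 * (freq.length : Int) ≤ S * value := by
      rw [hvcast]
      have : 0 < value := by omega
      nlinarith
    nlinarith
  have hloop := pvLoop_eq value hv ((S.toNat + 1) * value.toNat) freq 0 hlen hpos hfuel
  simp only [Nat.cast_zero] at hloop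
  rw [hloop, pvGmin_closed freq m k hv0 hm hk, hvcast]
  ring

-- ===== VERDICT (by name: the statement is the Claim_ definition above) =====
theorem findSmallestInteger_spec : Claim_equal_findSmallestInteger := by
  intro nums value _ hpre
  have hv : 1 ≤ value := hpre
  unfold Spec_findSmallestInteger
  simp only [findSmallestInteger, findSmallestInteger_alt]
  rw [pvBuild_eq value hv nums]
  rw [PySem.List.pyRepeat_singleton]
  obtain ⟨hlen, hpos⟩ := pvBuild_inv value hv nums (List.replicate value.toNat (0 : Int))
    (by rw [List.length_replicate]) (by intro e he; rw [List.eq_of_mem_replicate he])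
  exact pvMain value hv _ hlen hpos
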